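-- pv_equiv track=rewrite | github.com/may1729/tetris-4w-solver | lib/board_lib.py | unhash_board
-- ===== SOURCE A (Python) =====
-- from typing import Dict, Generator, List, Optional, Set, Tuple, TypeAlias, Callable
--
-- Board: TypeAlias = List[List[int]]
--
-- BoardHash: TypeAlias = int
--
-- def unhash_board(board_hash: BoardHash) -> Board:
--   """Converts an integer to a board state.
--
--   Treats board state like binary string. Bits are read top to bottom, and right to left within each row.
--   """
--   board = []
--   while board_hash > 0:
--     row_hash = board_hash % 16
--     board_hash //= 16
--     board.append([])
--     for square_num in range(4):
--       board[-1].append(row_hash % 2)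
--       row_hash //= 2
--   return board
-- ===== SOURCE B (Python) =====
-- def unhash_board(board_hash):
--   if board_hash <= 0:
--     return []
--   bits = bin(board_hash)[2:][::-1]
--   return [[int(c) for c in bits[i:i+4].ljust(4, '0')] for i in range(0, len(bits), 4)]
-- ===== Notes on version B (the rewrite author's own statement) =====
-- stated objective: idiomatic
-- what changed: B computes the whole binary digit string of the hash once (bin, reversed so bit 0 comes first) and slices it into 4-character rows right-padded with '0', instead of A's while-loop that repeatedly divides the integer by 16 and extracts each row bit-by-bit with % 2 and //= 2.
import Mathlib
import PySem

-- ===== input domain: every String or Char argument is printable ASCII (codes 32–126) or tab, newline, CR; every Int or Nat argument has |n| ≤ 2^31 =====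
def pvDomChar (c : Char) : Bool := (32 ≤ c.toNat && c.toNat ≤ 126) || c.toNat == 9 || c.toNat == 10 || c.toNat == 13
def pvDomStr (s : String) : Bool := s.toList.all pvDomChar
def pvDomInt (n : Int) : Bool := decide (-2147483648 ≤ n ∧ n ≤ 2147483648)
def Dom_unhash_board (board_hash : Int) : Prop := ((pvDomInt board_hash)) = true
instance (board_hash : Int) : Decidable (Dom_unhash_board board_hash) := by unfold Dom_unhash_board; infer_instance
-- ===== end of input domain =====

-- B decodes the hash by computing the whole binary digit string once and slicing it into
-- LSB-first rows of 4, instead of A's per-nibble integer division loop (objective: idiomatic).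

-- ===== PORT A =====
-- the while-loop of A, state = (board_hash, board); inner for-loop over range(4) as a foldl
def unhashLoop (h : Int) (board : List (List Int)) : List (List Int) :=
  if hpos : h > 0 then
    let row_hash := PySem.Int.mod h 16
    let h' := PySem.Int.floordiv h 16
    let inner := (PySem.List.pyRange 0 4 1).foldl
      (fun (st : Int × List Int) _ => (PySem.Int.floordiv st.1 2, st.2 ++ [PySem.Int.mod st.1 2]))
      (row_hash, [])
    unhashLoop h' (board ++ [inner.2])
  else board
termination_by h.toNat
decreasing_by
  simp only [PySem.Int.floordiv_eq_ediv_of_pos (by norm_num : (0:Int) < 16)]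
  omega

def unhash_board (board_hash : Int) : List (List Int) := unhashLoop board_hash []

-- ===== PORT B =====
-- bin(n)[2:] for n > 0 : binary digits, most significant first
def binStr (n : Nat) : List Char :=
  if h : n = 0 then [] else binStr (n / 2) ++ [if n % 2 = 1 then '1' else '0']
decreasing_by exact Nat.div_lt_self (Nat.pos_of_ne_zero h) one_lt_two

-- int(c) for a binary digit character
def digit (c : Char) : Int := if c = '1' then 1 else 0

-- the comprehension over range(0, len(bits), 4): each step takes bits[i:i+4].ljust(4,'0')
def chunk (l : List Char) : List (List Int) :=
  if h : l = [] then []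
  else (l.take 4 ++ List.replicate (4 - (l.take 4).length) '0').map digit :: chunk (l.drop 4)
termination_by l.length
decreasing_by
  have : l.length ≠ 0 := by simpa using h
  simp
  omega

def unhash_board_alt (board_hash : Int) : List (List Int) :=
  if board_hash ≤ 0 then [] else chunk ((binStr board_hash.toNat).reverse)

-- ===== PRECONDITION & SPEC =====
def Spec_unhash_board (board_hash : Int) (out : List (List Int)) : Prop := out = unhash_board_alt board_hash
instance (board_hash : Int) (out : List (List Int)) : Decidable (Spec_unhash_board board_hash out) := by unfold Spec_unhash_board; infer_instance

-- ===== CLAIM (what is proved, stated in full; the proofs are below) =====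
def Claim_equal_unhash_board : Prop := ∀ (board_hash : Int), Dom_unhash_board board_hash → Spec_unhash_board board_hash (unhash_board board_hash)

-- ===== LEMMAS AND PROOFS =====

-- canonical form: rows of the board as Nat arithmetic, LSB-first
def canon (n : Nat) : List (List Int) :=
  if h : n = 0 then []
  else [((n % 2 : Nat) : Int), ((n / 2 % 2 : Nat) : Int), ((n / 4 % 2 : Nat) : Int), ((n / 8 % 2 : Nat) : Int)] :: canon (n / 16)
decreasing_by exact Nat.div_lt_self (Nat.pos_of_ne_zero h) (by norm_num)

-- the binary digits, least significant first
def bitsL (n : Nat) : List Char :=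
  if h : n = 0 then [] else (if n % 2 = 1 then '1' else '0') :: bitsL (n / 2)
decreasing_by exact Nat.div_lt_self (Nat.pos_of_ne_zero h) one_lt_two

theorem binStr_reverse (n : Nat) : (binStr n).reverse = bitsL n := by
  induction n using Nat.strong_induction_on with
  | _ n ih =>
    rw [binStr, bitsL]
    by_cases h : n = 0
    · simp [h]
    · simp [h, ih (n / 2) (Nat.div_lt_self (Nat.pos_of_ne_zero h) one_lt_two)]

theorem bitsL_drop1 (n : Nat) : (bitsL n).drop 1 = bitsL (n / 2) := by
  rw [bitsL]
  by_cases h : n = 0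
  · simp [h, bitsL]
  · simp [h]

theorem bitsL_drop4 (n : Nat) : (bitsL n).drop 4 = bitsL (n / 16) := by
  have h4 : (4 : Nat) = 1 + (1 + (1 + 1)) := by norm_num
  rw [h4, ← List.drop_drop, ← List.drop_drop, ← List.drop_drop,
      bitsL_drop1, bitsL_drop1, bitsL_drop1, bitsL_drop1]
  norm_num [Nat.div_div_eq_div_mul]

theorem bitsL_row (n : Nat) (hn : 0 < n) :
    ((bitsL n).take 4 ++ List.replicate (4 - ((bitsL n).take 4).length) '0').map digit =
      [((n % 2 : Nat) : Int), ((n / 2 % 2 : Nat) : Int), ((n / 4 % 2 : Nat) : Int), ((n / 8 % 2 : Nat) : Int)] := by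
  have b : ∀ m : Nat, digit (if m % 2 = 1 then '1' else '0') = ((m % 2 : Nat) : Int) := by
    intro m; rcases Nat.mod_two_eq_zero_or_one m with h | h <;> simp [h, digit]
  have hz : bitsL 0 = [] := by rw [bitsL]; simp
  by_cases h2 : n / 2 = 0
  · rw [bitsL, dif_neg (by omega : ¬ n = 0), h2, hz]
    simp [digit, (by omega : n / 4 = 0), (by omega : n / 8 = 0)]
    split_ifs <;> omega
  · by_cases h4 : n / 4 = 0
    · rw [bitsL, dif_neg (by omega : ¬ n = 0)]
      rw [bitsL, dif_neg h2, (by omega : n / 2 / 2 = 0), hz]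
      simp [digit, h4, (by omega : n / 8 = 0)]
      split_ifs <;> omega
    · by_cases h8 : n / 8 = 0
      · rw [bitsL, dif_neg (by omega : ¬ n = 0)]
        rw [bitsL, dif_neg h2, (by omega : n / 2 / 2 = n / 4)]
        rw [bitsL, dif_neg h4, (by omega : n / 4 / 2 = 0), hz]
        simp [digit, h8]
        split_ifs <;> omega
      · rw [bitsL, dif_neg (by omega : ¬ n = 0)]
        rw [bitsL, dif_neg h2, (by omega : n / 2 / 2 = n / 4)]
        rw [bitsL, dif_neg h4, (by omega : n / 4 / 2 = n / 8)]
        rw [bitsL, dif_neg h8]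
        simp [b]

theorem chunk_bitsL (n : Nat) : chunk (bitsL n) = canon n := by
  induction n using Nat.strong_induction_on with
  | _ n ih =>
    by_cases h : n = 0
    · rw [h]; rw [bitsL, canon, chunk]; simp
    · have hpos : 0 < n := Nat.pos_of_ne_zero h
      have hne : bitsL n ≠ [] := by rw [bitsL]; simp [h]
      rw [canon, dif_neg h, chunk, dif_neg hne, bitsL_row n hpos, bitsL_drop4,
        ih (n / 16) (Nat.div_lt_self hpos (by norm_num))]

theorem unhashLoop_eq (n : Nat) : ∀ (h : Int) (board : List (List Int)), h.toNat = n →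
    unhashLoop h board = board ++ canon n := by
  induction n using Nat.strong_induction_on with
  | _ n ih =>
    intro h board hn
    rw [unhashLoop]
    by_cases hpos : h > 0
    · have hn0 : 0 < n := by omega
      have hcast : h = ((n : Nat) : Int) := by omega
      simp only [dif_pos hpos]
      have hm : PySem.Int.mod h 16 = ((n % 16 : Nat) : Int) := by
        rw [hcast]; exact_mod_cast PySem.Int.mod_natCast n 16
      have hf : PySem.Int.floordiv h 16 = ((n / 16 : Nat) : Int) := by
        rw [hcast]; exact_mod_cast PySem.Int.floordiv_natCast n 16
      have hrange : PySem.List.pyRange 0 4 1 = [0, 1, 2, 3] := by decide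
      rw [ih (n / 16) (Nat.div_lt_self hn0 (by norm_num)) _ _ (by rw [hf]; omega)]
      rw [List.append_assoc]
      congr 1
      conv_rhs => rw [canon]
      rw [dif_neg (by omega : ¬ n = 0)]
      simp only [hrange, List.foldl, hm]
      have s1 : ∀ m : Nat, PySem.Int.mod ((m : Nat) : Int) 2 = ((m % 2 : Nat) : Int) := by
        intro m; exact_mod_cast PySem.Int.mod_natCast m 2
      have s2 : ∀ m : Nat, PySem.Int.floordiv ((m : Nat) : Int) 2 = ((m / 2 : Nat) : Int) := by
        intro m; exact_mod_cast PySem.Int.floordiv_natCast m 2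
      simp only [s1, s2, List.nil_append, List.cons_append]
      have e0 : n % 16 % 2 = n % 2 := by omega
      have e1 : n % 16 / 2 % 2 = n / 2 % 2 := by omega
      have e2 : n % 16 / 2 / 2 % 2 = n / 4 % 2 := by omega
      have e3 : n % 16 / 2 / 2 / 2 % 2 = n / 8 % 2 := by omega
      rw [e0, e1, e2, e3]
    · have : n = 0 := by omega
      rw [this, canon]
      simp [hpos]

-- ===== VERDICT (by name: the statement is the Claim_ definition above) =====
theorem unhash_board_spec : Claim_equal_unhash_board := by
  intro h _
  unfold Spec_unhash_board unhash_board unhash_board_alt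
  rw [unhashLoop_eq h.toNat h [] rfl, binStr_reverse]
  by_cases hle : h ≤ 0
  · have : h.toNat = 0 := by omega
    rw [this, canon]
    simp [hle]
  · rw [if_neg hle, chunk_bitsL]
    simp
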